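-- pv_equiv track=rewrite | github.com/RyannDaGreat/rp | rp_ptpython/selection_utils.py | find_next_span
-- ===== SOURCE A (Python) =====
-- from typing import List, Tuple, Optional, Set
--
-- Span = Tuple[int, int]
--
-- def breaks_atomic(span: Span, atomic: Set[Span]) -> bool:
--     """Check if span partially overlaps any atomic span."""
--     s, e = span
--     for a_s, a_e in atomic:
--         if not (e <= a_s or s >= a_e or (a_s <= s and e <= a_e) or (s <= a_s and a_e <= e)):
--             return True
--     return False
--
-- def _contained_by_ast(span: Span, ast_spans: Set[Span]) -> bool:
--     """Check if span is fully contained by some AST span."""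
--     s, e = span
--     return any(a_s <= s and e <= a_e for a_s, a_e in ast_spans)
--
-- def find_next_span(
--     start: int, end: int,
--     all_spans: Set[Span],
--     atomic: Set[Span],
--     ast_spans: Optional[Set[Span]] = None,
--     code: Optional[str] = None
-- ) -> Optional[Span]:
--     """Find smallest span strictly containing [start, end)."""
--     ast_spans = ast_spans or set()
--     size = end - start
--
--     # If selection starts with whitespace, also consider its non-whitespace start
--     content_start = start
--     if code and start < end:
--         while content_start < end and code[content_start] in ' \t':
--             content_start += 1
--
--     def contains(sp: Span) -> bool:
--         """Check if span contains current selection (allowing whitespace prefix)."""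
--         if sp[1] - sp[0] <= size:
--             return False
--         # Normal containment
--         if sp[0] <= start and end <= sp[1]:
--             return True
--         # Allow if span contains content (after whitespace)
--         if content_start > start and sp[0] <= content_start and end <= sp[1]:
--             return True
--         return False
--
--     # Get containing candidates, sorted by size
--     cands = sorted(
--         [sp for sp in all_spans if contains(sp)],
--         key=lambda x: (x[1] - x[0], x[0])
--     ) if start != end else sorted(
--         [sp for sp in all_spans if sp[0] <= start < sp[1]],
--         key=lambda x: (x[1] - x[0], x[0])
--     )
--
--     # Filter: AST spans always ok, synthetics must be contained by some AST span
--     cands = [sp for sp in cands if sp in ast_spans or _contained_by_ast(sp, ast_spans)]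
--
--     # Return first non-breaking span
--     return next((sp for sp in cands if not breaks_atomic(sp, atomic)), None)
-- ===== SOURCE B (Python) =====
-- from typing import List, Tuple, Optional, Set
--
-- Span = Tuple[int, int]
--
-- def find_next_span(
--     start: int, end: int,
--     all_spans: Set[Span],
--     atomic: Set[Span],
--     ast_spans: Optional[Set[Span]] = None,
--     code: Optional[str] = None
-- ) -> Optional[Span]:
--     """Find smallest span strictly containing [start, end): single pass, no sort."""
--     ast = ast_spans or set()
--     size = end - start
--
--     # non-whitespace start of the selection, via slicing/lstrip (no index loop)
--     content_start = start
--     if code and start < end: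
--         seg = code[start:end]
--         content_start = start + (len(seg) - len(seg.lstrip(' \t')))
--
--     best = None
--     for sp in all_spans:
--         s, e = sp
--         if start != end:
--             if not (e - s > size and ((s <= start and end <= e) or
--                                       (content_start > start and s <= content_start and end <= e))):
--                 continue
--         else:
--             if not (s <= start < e):
--                 continue
--         if not (sp in ast or any(a <= s and e <= b for a, b in ast)):
--             continue
--         if any(not (e <= a_s or s >= a_e or (a_s <= s and e <= a_e) or (s <= a_s and a_e <= e))
--                for a_s, a_e in atomic):
--             continue
--         if best is None or (e - s, s) < (best[1] - best[0], best[0]):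
--             best = sp
--     return best
-- ===== Notes on version B (the rewrite author's own statement) =====
-- stated objective: simpler
-- what changed: Replaces A's build-candidates/sort-by-(size,start)/filter/next pipeline with a single pass over all_spans keeping a running argmin by (size,start) among spans that pass containment, AST and atomic checks at once, and computes the whitespace-skipping content_start by slicing+lstrip instead of an index loop.
-- outside the precondition, e.g. on find_next_span(-2, 1, {(-1, 9)}, set(), {(-1, 9)}, '  x'): A returns (-1, 9), B returns None
import Mathlib
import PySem

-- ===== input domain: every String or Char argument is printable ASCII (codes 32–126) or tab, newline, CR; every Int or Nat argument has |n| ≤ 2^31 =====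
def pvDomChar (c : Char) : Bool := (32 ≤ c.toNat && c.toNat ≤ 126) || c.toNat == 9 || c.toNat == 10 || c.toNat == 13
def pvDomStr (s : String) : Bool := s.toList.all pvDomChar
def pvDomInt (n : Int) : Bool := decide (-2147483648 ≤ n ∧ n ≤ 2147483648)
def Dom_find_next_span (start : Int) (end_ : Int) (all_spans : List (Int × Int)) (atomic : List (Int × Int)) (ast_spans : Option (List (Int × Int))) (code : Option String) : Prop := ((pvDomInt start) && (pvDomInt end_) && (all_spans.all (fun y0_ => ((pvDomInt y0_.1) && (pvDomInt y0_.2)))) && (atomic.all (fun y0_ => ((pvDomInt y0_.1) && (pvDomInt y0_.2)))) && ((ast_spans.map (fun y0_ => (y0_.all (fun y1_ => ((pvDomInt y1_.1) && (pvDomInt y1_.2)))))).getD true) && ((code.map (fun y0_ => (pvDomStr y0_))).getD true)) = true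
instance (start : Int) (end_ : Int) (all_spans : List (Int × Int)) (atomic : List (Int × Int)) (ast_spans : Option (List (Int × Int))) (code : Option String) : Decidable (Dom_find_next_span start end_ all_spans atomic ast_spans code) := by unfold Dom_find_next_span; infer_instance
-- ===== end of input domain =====

-- B replaces A's build/sort/filter/next pipeline with a single argmin pass over all_spans (objective: simpler).

-- ===== PORT A =====
-- breaks_atomic: the for-loop with early 'return True' is List.any
def fns_breaks_atomic (span : Int × Int) (atomic : List (Int × Int)) : Bool :=
  atomic.any (fun a =>
    !(decide (span.2 ≤ a.1) || decide (span.1 ≥ a.2) ||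
      (decide (a.1 ≤ span.1) && decide (span.2 ≤ a.2)) ||
      (decide (span.1 ≤ a.1) && decide (a.2 ≤ span.2))))

def fns_contained_by_ast (span : Int × Int) (ast : List (Int × Int)) : Bool :=
  ast.any (fun a => decide (a.1 ≤ span.1) && decide (span.2 ≤ a.2))

-- the 'while content_start < end and code[content_start] in " \t"' loop
def fnsScan (cs : List Char) (end_ : Int) (content_start : Int) : Int :=
  if _h : content_start < end_ then
    match PySem.List.pyGet? cs content_start with
    | some c => if c = ' ' ∨ c = '\t' then fnsScan cs end_ (content_start + 1) else content_start
    | none => content_start   -- IndexError in Python; excluded by Pre_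
  else content_start
termination_by (end_ - content_start).toNat
decreasing_by omega

-- the inner 'def contains(sp)'
def fns_contains (start end_ size content_start : Int) (sp : Int × Int) : Bool :=
  if sp.2 - sp.1 ≤ size then false
  else if sp.1 ≤ start ∧ end_ ≤ sp.2 then true
  else if content_start > start ∧ sp.1 ≤ content_start ∧ end_ ≤ sp.2 then true
  else false

def find_next_span (start : Int) (end_ : Int) (all_spans : List (Int × Int)) (atomic : List (Int × Int)) (ast_spans : Option (List (Int × Int))) (code : Option String) : Option (Int × Int) :=
  let ast := match ast_spans with | none => [] | some l => l   -- ast_spans or set()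
  let size := end_ - start
  let cs : List Char := match code with | none => [] | some s => s.toList
  let content_start : Int := if cs ≠ [] ∧ start < end_ then fnsScan cs end_ start else start
  let cands :=
    if start ≠ end_ then
      PySem.List.sorted2 (all_spans.filter (fun sp => fns_contains start end_ size content_start sp))
        (fun x => x.2 - x.1) (fun x => x.1)
    else
      PySem.List.sorted2 (all_spans.filter (fun sp => decide (sp.1 ≤ start) && decide (start < sp.2)))
        (fun x => x.2 - x.1) (fun x => x.1)
  let cands2 := cands.filter (fun sp => decide (sp ∈ ast) || fns_contained_by_ast sp ast)
  cands2.find? (fun sp => !fns_breaks_atomic sp atomic)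

-- ===== PORT B =====
def find_next_span_alt (start : Int) (end_ : Int) (all_spans : List (Int × Int)) (atomic : List (Int × Int)) (ast_spans : Option (List (Int × Int))) (code : Option String) : Option (Int × Int) :=
  let ast := match ast_spans with | none => [] | some l => l
  let size := end_ - start
  let cs : List Char := match code with | none => [] | some s => s.toList
  let content_start : Int :=
    if cs ≠ [] ∧ start < end_ then
      let seg := PySem.List.slice cs (some start) (some end_)            -- code[start:end]
      let stripped := seg.dropWhile (fun c => c == ' ' || c == '\t')     -- seg.lstrip(' \t'), exact hand port
      start + ((seg.length : Int) - (stripped.length : Int))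
    else start
  all_spans.foldl (fun best sp =>
    let ok : Bool :=
      if start ≠ end_ then
        decide (size < sp.2 - sp.1) &&
          (decide (sp.1 ≤ start ∧ end_ ≤ sp.2) ||
           decide (content_start > start ∧ sp.1 ≤ content_start ∧ end_ ≤ sp.2))
      else decide (sp.1 ≤ start ∧ start < sp.2)
    if !ok then best
    else if !(decide (sp ∈ ast) || ast.any (fun a => decide (a.1 ≤ sp.1 ∧ sp.2 ≤ a.2))) then best
    else if atomic.any (fun a =>
        !decide (sp.2 ≤ a.1 ∨ sp.1 ≥ a.2 ∨ (a.1 ≤ sp.1 ∧ sp.2 ≤ a.2) ∨ (sp.1 ≤ a.1 ∧ a.2 ≤ sp.2))) then best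
    else match best with
      | none => some sp
      | some b =>
        if sp.2 - sp.1 < b.2 - b.1 ∨ (sp.2 - sp.1 = b.2 - b.1 ∧ sp.1 < b.1) then some sp else best)
    none

-- ===== PRECONDITION & SPEC =====
-- Pre_ excludes exactly the content_start scans that leave the function's natural domain of selection
-- offsets: a negative start (where Python silently reads code via negative-index wraparound) and an
-- all-blank overrun past the end of code (where A raises IndexError).
def Pre_find_next_span (start : Int) (end_ : Int) (all_spans : List (Int × Int)) (atomic : List (Int × Int)) (ast_spans : Option (List (Int × Int))) (code : Option String) : Prop :=
  (code.getD "").toList = [] ∨ end_ ≤ start ∨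
    (0 ≤ start ∧ (end_ ≤ ((code.getD "").toList.length : Int) ∨
      ((code.getD "").toList.drop start.toNat).any (fun c => !(c == ' ' || c == '\t')) = true))
instance (start : Int) (end_ : Int) (all_spans : List (Int × Int)) (atomic : List (Int × Int)) (ast_spans : Option (List (Int × Int))) (code : Option String) : Decidable (Pre_find_next_span start end_ all_spans atomic ast_spans code) := by unfold Pre_find_next_span; infer_instance

def pvWitness_find_next_span : Int × Int × (List (Int × Int)) × (List (Int × Int)) × (Option (List (Int × Int))) × Option String :=
  (0, 1, [(0, 2)], [], some [(0, 2)], some "ab")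

def Spec_find_next_span (start : Int) (end_ : Int) (all_spans : List (Int × Int)) (atomic : List (Int × Int)) (ast_spans : Option (List (Int × Int))) (code : Option String) (out : Option (Int × Int)) : Prop := out = find_next_span_alt start end_ all_spans atomic ast_spans code
instance (start : Int) (end_ : Int) (all_spans : List (Int × Int)) (atomic : List (Int × Int)) (ast_spans : Option (List (Int × Int))) (code : Option String) (out : Option (Int × Int)) : Decidable (Spec_find_next_span start end_ all_spans atomic ast_spans code out) := by unfold Spec_find_next_span; infer_instance

-- ===== CLAIM (what is proved, stated in full; the proofs are below) =====
def Claim_equal_find_next_span : Prop := ∀ (start : Int) (end_ : Int) (all_spans : List (Int × Int)) (atomic : List (Int × Int)) (ast_spans : Option (List (Int × Int))) (code : Option String), Dom_find_next_span start end_ all_spans atomic ast_spans code → Pre_find_next_span start end_ all_spans atomic ast_spans code → Spec_find_next_span start end_ all_spans atomic ast_spans code (find_next_span start end_ all_spans atomic ast_spans code)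

-- ===== LEMMAS AND PROOFS =====

def spLT (a b : Int × Int) : Bool :=
  decide (a.2 - a.1 < b.2 - b.1) || (!decide (b.2 - b.1 < a.2 - a.1) && decide (a.1 < b.1))
lemma spLT_iff (a b : Int × Int) :
    spLT a b = true ↔ (a.2 - a.1 < b.2 - b.1 ∨ (¬(b.2 - b.1 < a.2 - a.1) ∧ a.1 < b.1)) := by
  simp [spLT]

lemma spLT_antisymm_eq {a b : Int × Int} (h1 : spLT a b = false) (h2 : spLT b a = false) : a = b := by
  rw [← Bool.not_eq_true] at h1 h2
  rw [spLT_iff] at h1 h2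
  have : a.1 = b.1 ∧ a.2 = b.2 := by omega
  exact Prod.ext this.1 this.2

def bStep (q : Int × Int → Bool) (best : Option (Int × Int)) (sp : Int × Int) : Option (Int × Int) :=
  if q sp then
    match best with
    | none => some sp
    | some b => if spLT sp b then some sp else best
  else best
def bFold (q : Int × Int → Bool) (l : List (Int × Int)) (acc : Option (Int × Int)) : Option (Int × Int) :=
  l.foldl (bStep q) acc

lemma bFold_none (q : Int × Int → Bool) :
    ∀ (l : List (Int × Int)) (acc : Option (Int × Int)),
      bFold q l acc = none ↔ (acc = none ∧ ∀ x ∈ l, q x = false) := by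
  intro l
  induction l with
  | nil => intro acc; simp [bFold]
  | cons x t ih =>
    intro acc
    rw [show bFold q (x :: t) acc = bFold q t (bStep q acc x) from rfl, ih]
    unfold bStep
    by_cases hx : q x = true
    · simp only [hx, if_pos]
      constructor
      · rintro ⟨h1, h2⟩; cases acc with
        | none => simp at h1
        | some b => by_cases hlt : spLT x b = true <;> simp [hlt] at h1
      · rintro ⟨h1, h2⟩
        exact absurd (h2 x (by simp)) (by simp [hx])
    · simp only [Bool.not_eq_true] at hx
      simp only [hx, Bool.false_eq_true, if_false]
      constructor
      · rintro ⟨h1, h2⟩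
        exact ⟨h1, fun y hy => (List.mem_cons.mp hy).elim (fun h => h ▸ hx) (h2 y)⟩
      · rintro ⟨h1, h2⟩
        exact ⟨h1, fun y hy => h2 y (List.mem_cons_of_mem _ hy)⟩

lemma bFold_mem (q : Int × Int → Bool) :
    ∀ (l : List (Int × Int)) (acc : Option (Int × Int)) (m : Int × Int),
      bFold q l acc = some m → (m ∈ l ∧ q m = true) ∨ acc = some m := by
  intro l
  induction l with
  | nil => intro acc m h; right; simpa [bFold] using h
  | cons x t ih =>
    intro acc m h
    rw [show bFold q (x :: t) acc = bFold q t (bStep q acc x) from rfl] at h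
    rcases ih _ m h with ⟨hm, hq⟩ | hacc
    · exact Or.inl ⟨List.mem_cons_of_mem _ hm, hq⟩
    · unfold bStep at hacc
      by_cases hx : q x = true
      · simp only [hx, if_pos] at hacc
        cases acc with
        | none =>
          have : x = m := by simpa using hacc
          subst this; left; exact ⟨by simp, hx⟩
        | some b =>
          by_cases hlt : spLT x b = true
          · have : x = m := by simpa [hlt] using hacc
            subst this; left; exact ⟨by simp, hx⟩
          · right; simpa [hlt] using hacc
      · right; simpa [hx] using hacc

lemma spLT_trans_neg {a b c : Int × Int} (h1 : spLT a b = false) (h2 : spLT b c = false) : spLT a c = false := by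
  simp only [spLT, Bool.or_eq_false_iff, Bool.and_eq_false_iff, decide_eq_false_iff_not,
    Bool.not_eq_false', decide_eq_true_eq] at *
  omega

lemma spLT_true_false_trans {a b c : Int × Int} (h1 : spLT a b = true) (h2 : spLT a c = false) : spLT b c = false := by
  simp only [spLT, Bool.or_eq_true, Bool.or_eq_false_iff, Bool.and_eq_true, Bool.and_eq_false_iff,
    decide_eq_false_iff_not, Bool.not_eq_false', Bool.not_eq_true', decide_eq_true_eq, decide_eq_false_iff_not] at *
  omega

lemma bFold_min (q : Int × Int → Bool) :
    ∀ (l : List (Int × Int)) (acc : Option (Int × Int)) (m : Int × Int),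
      bFold q l acc = some m →
      (∀ y ∈ l, q y = true → spLT y m = false) ∧ (∀ b, acc = some b → spLT b m = false) := by
  intro l
  induction l with
  | nil =>
    intro acc m h
    refine ⟨by simp, fun b hb => ?_⟩
    simp [bFold] at h; rw [hb] at h
    simp only [Option.some_inj] at h; subst h
    simp [spLT]
  | cons x t ih =>
    intro acc m h
    rw [show bFold q (x :: t) acc = bFold q t (bStep q acc x) from rfl] at h
    obtain ⟨ht, hacc'⟩ := ih _ m h
    have hstep : ∀ b, bStep q acc x = some b → spLT b m = false := hacc'
    have hx' : q x = true → spLT x m = false := by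
      intro hx
      unfold bStep at hstep
      cases acc with
      | none => exact hstep x (by simp [hx])
      | some b =>
        by_cases hlt : spLT x b = true
        · exact hstep x (by simp [hx, hlt])
        · have hb : spLT b m = false := hstep b (by simp [hx, hlt])
          exact spLT_trans_neg (by simpa using hlt) hb
    refine ⟨fun y hy hqy => ?_, fun b hb => ?_⟩
    · rcases List.mem_cons.mp hy with rfl | hy'
      · exact hx' hqy
      · exact ht y hy' hqy
    · unfold bStep at hstep
      by_cases hx : q x = true
      · cases acc with
        | none => simp at hb
        | some b0 =>
          have hb0 : b0 = b := by injection hb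
          subst hb0
          by_cases hlt : spLT x b0 = true
          · have hxm : spLT x m = false := hstep x (by simp [hx, hlt])
            exact spLT_true_false_trans hlt hxm
          · exact hstep b0 (by simp [hx, hlt])
      · exact hstep b (by rw [if_neg (by simp [hx]), hb])

lemma spLT_false_of_true_right {a b c : Int × Int} (h1 : spLT a b = true) (h2 : spLT c b = false) : spLT c a = false := by
  simp only [spLT, Bool.or_eq_true, Bool.or_eq_false_iff, Bool.and_eq_true, Bool.and_eq_false_iff,
    decide_eq_false_iff_not, Bool.not_eq_false', Bool.not_eq_true', decide_eq_true_eq] at *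
  omega

lemma spLT_asymm {a b : Int × Int} (h : spLT a b = true) : spLT b a = false := by
  simp only [spLT, Bool.or_eq_true, Bool.or_eq_false_iff, Bool.and_eq_true, Bool.and_eq_false_iff,
    decide_eq_false_iff_not, Bool.not_eq_false', Bool.not_eq_true', decide_eq_true_eq] at *
  omega

lemma insertBy_spLT_pairwise (x : Int × Int) (ys : List (Int × Int))
    (h : ys.Pairwise (fun a b => spLT b a = false)) :
    (PySem.List.insertBy spLT x ys).Pairwise (fun a b => spLT b a = false) := by
  induction ys with
  | nil => simp [PySem.List.insertBy]
  | cons y t ih =>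
    rw [List.pairwise_cons] at h
    obtain ⟨hy, ht⟩ := h
    by_cases hlt : spLT x y = true
    · rw [show PySem.List.insertBy spLT x (y :: t) = x :: y :: t by simp [PySem.List.insertBy, hlt]]
      refine List.Pairwise.cons (fun z hz => ?_) (List.Pairwise.cons hy ht)
      rcases List.mem_cons.mp hz with rfl | hz'
      · exact spLT_asymm hlt
      · exact spLT_false_of_true_right hlt (hy z hz')
    · rw [show PySem.List.insertBy spLT x (y :: t) = y :: PySem.List.insertBy spLT x t by
        simp [PySem.List.insertBy]; intro hc; exact absurd hc hlt]
      refine List.Pairwise.cons (fun z hz => ?_) (ih ht)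
      rcases (PySem.List.mem_insertBy spLT x z t).mp hz with rfl | hz'
      · simpa using hlt
      · exact hy z hz'

lemma sorted2_spLT_pairwise (l : List (Int × Int)) :
    (PySem.List.sorted2 l (fun x => x.2 - x.1) (fun x => x.1)).Pairwise (fun a b => spLT b a = false) := by
  have main : ∀ (l acc : List (Int × Int)), acc.Pairwise (fun a b => spLT b a = false) →
      (l.foldl (fun acc x => PySem.List.insertBy spLT x acc) acc).Pairwise (fun a b => spLT b a = false) := by
    intro l
    induction l with
    | nil => intro acc h; simpa
    | cons x t ih => intro acc h; exact ih _ (insertBy_spLT_pairwise x acc h)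
  have : PySem.List.sorted2 l (fun x : Int × Int => x.2 - x.1) (fun x => x.1) =
      l.foldl (fun acc x => PySem.List.insertBy spLT x acc) [] := rfl
  rw [this]
  exact main l [] (by simp)

lemma find?_pairwise_min {l : List (Int × Int)} {p : Int × Int → Bool} {m : Int × Int}
    (hp : l.Pairwise (fun a b => spLT b a = false)) (h : l.find? p = some m) :
    ∀ y ∈ l, p y = true → spLT y m = false := by
  induction l with
  | nil => simp at h
  | cons x t ih =>
    rw [List.pairwise_cons] at hp
    obtain ⟨hx, ht⟩ := hp
    by_cases hpx : p x = true
    · rw [List.find?_cons_of_pos hpx] at h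
      have hm : x = m := by injection h
      subst hm
      intro y hy hpy
      rcases List.mem_cons.mp hy with rfl | hy'
      · simp [spLT]
      · exact hx y hy'
    · rw [List.find?_cons_of_neg (by simp [hpx])] at h
      intro y hy hpy
      rcases List.mem_cons.mp hy with rfl | hy'
      · exact absurd hpy hpx
      · exact ih ht h y hy' hpy

def aPipe (p1 p2 p3 : Int × Int → Bool) (l : List (Int × Int)) : Option (Int × Int) :=
  ((PySem.List.sorted2 (l.filter p1) (fun x => x.2 - x.1) (fun x => x.1)).filter p2).find? p3

lemma mem_aPipe_iff (p1 p2 : Int × Int → Bool) (l : List (Int × Int)) (x : Int × Int) :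
    x ∈ (PySem.List.sorted2 (l.filter p1) (fun x => x.2 - x.1) (fun x => x.1)).filter p2 ↔
      (x ∈ l ∧ p1 x = true ∧ p2 x = true) := by
  rw [List.mem_filter, (PySem.List.sorted2_perm (l.filter p1) _ _ false).mem_iff, List.mem_filter]
  tauto

lemma aPipe_eq_bFold (p1 p2 p3 : Int × Int → Bool) (l : List (Int × Int)) :
    aPipe p1 p2 p3 l = bFold (fun sp => p1 sp && p2 sp && p3 sp) l none := by
  set q : Int × Int → Bool := fun sp => p1 sp && p2 sp && p3 sp with hq
  have hq' : ∀ sp, q sp = true ↔ (p1 sp = true ∧ p2 sp = true ∧ p3 sp = true) := by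
    intro sp; simp [hq, Bool.and_eq_true, and_assoc]
  cases hA : aPipe p1 p2 p3 l with
  | none =>
    cases hB : bFold q l none with
    | none => rfl
    | some m =>
      exfalso
      rcases bFold_mem q l none m hB with ⟨hm, hqm⟩ | h; swap; · simp at h
      obtain ⟨h1, h2, h3⟩ := (hq' m).mp hqm
      unfold aPipe at hA
      rw [List.find?_eq_none] at hA
      exact hA m ((mem_aPipe_iff p1 p2 l m).mpr ⟨hm, h1, h2⟩) h3
  | some m =>
    have hmem := (mem_aPipe_iff p1 p2 l m).mp (List.mem_of_find?_eq_some hA)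
    have hp3 := List.find?_some hA
    have hqm : q m = true := (hq' m).mpr ⟨hmem.2.1, hmem.2.2, hp3⟩
    cases hB : bFold q l none with
    | none =>
      exfalso
      have := ((bFold_none q l none).mp hB).2 m hmem.1
      simp [this] at hqm
    | some m' =>
      -- minimality both ways
      have hBmin := (bFold_min q l none m' hB).1
      have hm'mem : m' ∈ l ∧ q m' = true := by
        rcases bFold_mem q l none m' hB with h | h; exact h; simp at h
      obtain ⟨h1', h2', h3'⟩ := (hq' m').mp hm'mem.2
      have hAmin := find?_pairwise_min
        (List.Pairwise.filter p2 (sorted2_spLT_pairwise (l.filter p1))) hA m'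
        ((mem_aPipe_iff p1 p2 l m').mpr ⟨hm'mem.1, h1', h2'⟩) h3'
      have hBm : spLT m m' = false := hBmin m hmem.1 hqm
      exact congrArg some (spLT_antisymm_eq hBm hAmin)


lemma pyGet?_nonneg_lt {cs : List Char} {i : Int} (h0 : 0 ≤ i) (hl : i.toNat < cs.length) :
    PySem.List.pyGet? cs i = some cs[i.toNat] := by
  simp [PySem.List.pyGet?, PySem.List.pyIdx?, h0, show i < (cs.length : Int) by omega]

lemma pyGet?_nonneg_ge {cs : List Char} {i : Int} (h0 : 0 ≤ i) (hl : cs.length ≤ i.toNat) :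
    PySem.List.pyGet? cs i = none := by
  simp [PySem.List.pyGet?, PySem.List.pyIdx?, h0, show ¬ i < (cs.length : Int) by omega]

lemma fnsScan_eq_takeWhile (cs : List Char) (end_ : Int) :
    ∀ (n : Nat) (i : Int), (end_ - i).toNat = n → 0 ≤ i →
      fnsScan cs end_ i =
        i + ((((cs.drop i.toNat).take (end_ - i).toNat).takeWhile (fun c => c == ' ' || c == '\t')).length : Int) := by
  intro n
  induction n with
  | zero =>
    intro i hn h0
    rw [fnsScan]
    rw [dif_neg (by omega), hn]
    simp
  | succ k ih =>
    intro i hn h0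
    have hilt : i < end_ := by omega
    rw [fnsScan, dif_pos hilt]
    by_cases hlen : i.toNat < cs.length
    · rw [pyGet?_nonneg_lt h0 hlen]
      rw [List.drop_eq_getElem_cons hlen, hn, List.take_succ_cons, List.takeWhile_cons]
      simp only []
      by_cases hws : cs[i.toNat] = ' ' ∨ cs[i.toNat] = '\t'
      · rw [if_pos hws]
        have hb : (cs[i.toNat] == ' ' || cs[i.toNat] == '\t') = true := by
          rcases hws with h | h <;> simp [h]
        rw [hb, if_pos rfl]
        rw [ih (i + 1) (by omega) (by omega)]
        have htn : (i + 1).toNat = i.toNat + 1 := by omega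
        have hen : (end_ - (i + 1)).toNat = k := by omega
        rw [htn, hen]
        push_cast [List.length_cons]
        omega
      · rw [if_neg hws]
        have hb : (cs[i.toNat] == ' ' || cs[i.toNat] == '\t') = false := by
          simp only [Bool.or_eq_false_iff, beq_eq_false_iff_ne]
          exact ⟨fun h => hws (Or.inl h), fun h => hws (Or.inr h)⟩
        rw [hb]
        simp
    · rw [pyGet?_nonneg_ge h0 (by omega)]
      rw [List.drop_eq_nil_of_le (by omega)]
      simp




def aTail (start end_ c : Int) (all atomic ast : List (Int × Int)) : Option (Int × Int) :=
  (((if start ≠ end_ then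
      PySem.List.sorted2 (all.filter (fun sp => fns_contains start end_ (end_ - start) c sp))
        (fun x => x.2 - x.1) (fun x => x.1)
    else
      PySem.List.sorted2 (all.filter (fun sp => decide (sp.1 ≤ start) && decide (start < sp.2)))
        (fun x => x.2 - x.1) (fun x => x.1))).filter
      (fun sp => decide (sp ∈ ast) || fns_contained_by_ast sp ast)).find?
    (fun sp => !fns_breaks_atomic sp atomic)

def bTail (start end_ c : Int) (all atomic ast : List (Int × Int)) : Option (Int × Int) :=
  let size := end_ - start
  all.foldl (fun best sp =>
    let ok : Bool :=
      if start ≠ end_ then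
        decide (size < sp.2 - sp.1) &&
          (decide (sp.1 ≤ start ∧ end_ ≤ sp.2) ||
           decide (c > start ∧ sp.1 ≤ c ∧ end_ ≤ sp.2))
      else decide (sp.1 ≤ start ∧ start < sp.2)
    if !ok then best
    else if !(decide (sp ∈ ast) || ast.any (fun a => decide (a.1 ≤ sp.1 ∧ sp.2 ≤ a.2))) then best
    else if atomic.any (fun a =>
        !decide (sp.2 ≤ a.1 ∨ sp.1 ≥ a.2 ∨ (a.1 ≤ sp.1 ∧ sp.2 ≤ a.2) ∨ (sp.1 ≤ a.1 ∧ a.2 ≤ sp.2))) then best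
    else match best with
      | none => some sp
      | some b =>
        if sp.2 - sp.1 < b.2 - b.1 ∨ (sp.2 - sp.1 = b.2 - b.1 ∧ sp.1 < b.1) then some sp else best)
    none

lemma bTail_step_eq (start end_ c : Int) (atomic ast : List (Int × Int)) (p1 : (Int × Int) → Bool)
    (hp1 : ∀ sp, (if start ≠ end_ then
        decide (end_ - start < sp.2 - sp.1) &&
          (decide (sp.1 ≤ start ∧ end_ ≤ sp.2) ||
           decide (c > start ∧ sp.1 ≤ c ∧ end_ ≤ sp.2))
      else decide (sp.1 ≤ start ∧ start < sp.2)) = p1 sp) :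
    (fun (best : Option (Int × Int)) (sp : Int × Int) =>
      let ok : Bool :=
        if start ≠ end_ then
          decide (end_ - start < sp.2 - sp.1) &&
            (decide (sp.1 ≤ start ∧ end_ ≤ sp.2) ||
             decide (c > start ∧ sp.1 ≤ c ∧ end_ ≤ sp.2))
        else decide (sp.1 ≤ start ∧ start < sp.2)
      if !ok then best
      else if !(decide (sp ∈ ast) || ast.any (fun a => decide (a.1 ≤ sp.1 ∧ sp.2 ≤ a.2))) then best
      else if atomic.any (fun a =>
          !decide (sp.2 ≤ a.1 ∨ sp.1 ≥ a.2 ∨ (a.1 ≤ sp.1 ∧ sp.2 ≤ a.2) ∨ (sp.1 ≤ a.1 ∧ a.2 ≤ sp.2))) then best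
      else match best with
        | none => some sp
        | some b =>
          if sp.2 - sp.1 < b.2 - b.1 ∨ (sp.2 - sp.1 = b.2 - b.1 ∧ sp.1 < b.1) then some sp else best) =
    bStep (fun sp => p1 sp && (decide (sp ∈ ast) || fns_contained_by_ast sp ast) && !fns_breaks_atomic sp atomic) := by
  funext best sp
  simp only [bStep]
  simp only [← hp1 sp]
  set okv := (if start ≠ end_ then
        decide (end_ - start < sp.2 - sp.1) &&
          (decide (sp.1 ≤ start ∧ end_ ≤ sp.2) ||
           decide (c > start ∧ sp.1 ≤ c ∧ end_ ≤ sp.2))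
      else decide (sp.1 ≤ start ∧ start < sp.2)) with hok
  have h2 : (ast.any (fun a => decide (a.1 ≤ sp.1 ∧ sp.2 ≤ a.2))) = fns_contained_by_ast sp ast := by
    unfold fns_contained_by_ast
    congr 1
    funext a
    rw [Bool.eq_iff_iff]
    simp
  have h3 : (atomic.any (fun a =>
      !decide (sp.2 ≤ a.1 ∨ sp.1 ≥ a.2 ∨ (a.1 ≤ sp.1 ∧ sp.2 ≤ a.2) ∨ (sp.1 ≤ a.1 ∧ a.2 ≤ sp.2)))) =
      fns_breaks_atomic sp atomic := by
    unfold fns_breaks_atomic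
    congr 1
    funext a
    rw [Bool.eq_iff_iff]
    simp only [Bool.not_eq_true', Bool.or_eq_false_iff, Bool.and_eq_false_iff,
      decide_eq_false_iff_not]
    tauto
  have h4 : ∀ b : Int × Int,
      (decide (sp.2 - sp.1 < b.2 - b.1 ∨ (sp.2 - sp.1 = b.2 - b.1 ∧ sp.1 < b.1)) : Bool) = spLT sp b := by
    intro b
    rw [Bool.eq_iff_iff]
    simp only [decide_eq_true_eq, spLT, Bool.or_eq_true, Bool.and_eq_true, Bool.not_eq_true',
      decide_eq_true_eq, decide_eq_false_iff_not]
    omega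
  rw [h2, h3]
  cases hokv : okv
  · simp
  · simp only [Bool.not_true, Bool.false_eq_true, if_false, Bool.true_and]
    by_cases hast : (decide (sp ∈ ast) || fns_contained_by_ast sp ast) = true
    · rw [hast]
      simp only [Bool.not_true, Bool.false_eq_true, if_false, Bool.true_and]
      by_cases hbr : fns_breaks_atomic sp atomic = true
      · simp [hbr]
      · simp only [Bool.not_eq_true] at hbr
        simp only [hbr, Bool.false_eq_true, if_false, Bool.not_false, if_true]
        cases best with
        | none => rfl
        | some b =>
          by_cases hlt : (sp.2 - sp.1 < b.2 - b.1 ∨ (sp.2 - sp.1 = b.2 - b.1 ∧ sp.1 < b.1))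
          · have hx : spLT sp b = true := by rw [← h4 b]; exact decide_eq_true hlt
            simp [hlt, hx]
          · have hx : spLT sp b = false := by rw [← h4 b]; exact decide_eq_false hlt
            simp [hlt, hx]
    · simp only [Bool.not_eq_true] at hast
      simp [hast]

lemma tail_eq (start end_ c : Int) (all atomic ast : List (Int × Int)) :
    aTail start end_ c all atomic ast = bTail start end_ c all atomic ast := by
  by_cases hse : start ≠ end_
  · have hp1 : ∀ sp : Int × Int, (if start ≠ end_ then
        decide (end_ - start < sp.2 - sp.1) &&
          (decide (sp.1 ≤ start ∧ end_ ≤ sp.2) ||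
           decide (c > start ∧ sp.1 ≤ c ∧ end_ ≤ sp.2))
      else decide (sp.1 ≤ start ∧ start < sp.2)) = fns_contains start end_ (end_ - start) c sp := by
      intro sp
      rw [if_pos hse, Bool.eq_iff_iff]
      simp only [Bool.and_eq_true, Bool.or_eq_true, decide_eq_true_eq]
      unfold fns_contains
      split_ifs with h1 h2 h3 <;> simp <;> omega
    have hb : bTail start end_ c all atomic ast =
        bFold (fun sp => fns_contains start end_ (end_ - start) c sp &&
          (decide (sp ∈ ast) || fns_contained_by_ast sp ast) && !fns_breaks_atomic sp atomic) all none := by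
      exact congrArg (fun f => List.foldl f none all) (bTail_step_eq start end_ c atomic ast _ hp1)
    have ha : aTail start end_ c all atomic ast =
        aPipe (fun sp => fns_contains start end_ (end_ - start) c sp)
          (fun sp => decide (sp ∈ ast) || fns_contained_by_ast sp ast)
          (fun sp => !fns_breaks_atomic sp atomic) all := by
      unfold aTail aPipe
      rw [if_pos hse]
    rw [ha, hb]
    exact aPipe_eq_bFold _ _ _ all
  · have hp1 : ∀ sp : Int × Int, (if start ≠ end_ then
        decide (end_ - start < sp.2 - sp.1) &&
          (decide (sp.1 ≤ start ∧ end_ ≤ sp.2) ||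
           decide (c > start ∧ sp.1 ≤ c ∧ end_ ≤ sp.2))
      else decide (sp.1 ≤ start ∧ start < sp.2)) =
        (decide (sp.1 ≤ start) && decide (start < sp.2)) := by
      intro sp
      rw [if_neg hse, Bool.eq_iff_iff]
      simp
    have hb : bTail start end_ c all atomic ast =
        bFold (fun sp => (decide (sp.1 ≤ start) && decide (start < sp.2)) &&
          (decide (sp ∈ ast) || fns_contained_by_ast sp ast) && !fns_breaks_atomic sp atomic) all none := by
      exact congrArg (fun f => List.foldl f none all) (bTail_step_eq start end_ c atomic ast _ hp1)
    have ha : aTail start end_ c all atomic ast =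
        aPipe (fun sp => decide (sp.1 ≤ start) && decide (start < sp.2))
          (fun sp => decide (sp ∈ ast) || fns_contained_by_ast sp ast)
          (fun sp => !fns_breaks_atomic sp atomic) all := by
      unfold aTail aPipe
      rw [if_neg hse]
    rw [ha, hb]
    exact aPipe_eq_bFold _ _ _ all

def optChars : Option String → List Char
  | none => []
  | some s => s.toList

def optSpans : Option (List (Int × Int)) → List (Int × Int)
  | none => []
  | some l => l

theorem find_next_span_spec : Claim_equal_find_next_span := by
  intro start end_ all_spans atomic ast_spans code hdom hpre
  unfold Spec_find_next_span
  unfold Pre_find_next_span at hpre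
  have hcs' : (code.getD "").toList = (optChars code) := by
    cases code <;> rfl
  rw [hcs'] at hpre
  have hA : find_next_span start end_ all_spans atomic ast_spans code =
      aTail start end_
        (if (optChars code) ≠ [] ∧ start < end_ then
          fnsScan (optChars code) end_ start
        else start)
        all_spans atomic (optSpans ast_spans) := rfl
  have hB : find_next_span_alt start end_ all_spans atomic ast_spans code =
      bTail start end_
        (if (optChars code) ≠ [] ∧ start < end_ then
          let seg := PySem.List.slice (optChars code) (some start) (some end_)
          let stripped := seg.dropWhile (fun c => c == ' ' || c == '\t')
          start + ((seg.length : Int) - (stripped.length : Int))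
        else start)
        all_spans atomic (optSpans ast_spans) := rfl
  rw [hA, hB]
  have hcc : (if (optChars code) ≠ [] ∧ start < end_ then
          fnsScan (optChars code) end_ start
        else start) =
      (if (optChars code) ≠ [] ∧ start < end_ then
          let seg := PySem.List.slice (optChars code) (some start) (some end_)
          let stripped := seg.dropWhile (fun c => c == ' ' || c == '\t')
          start + ((seg.length : Int) - (stripped.length : Int))
        else start) := by
    generalize (optChars code) = cs at hpre ⊢
    by_cases hg : cs ≠ [] ∧ start < end_
    · rw [if_pos hg, if_pos hg]
      obtain ⟨hne, hlt⟩ := hg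
      have h0 : 0 ≤ start := by
        rcases hpre with h | h | h
        · exact absurd h hne
        · omega
        · exact h.1
      have hslice : PySem.List.slice cs (some start) (some end_) =
          (cs.drop start.toNat).take (end_ - start).toNat := by
        have h1 : start = ((start.toNat : Nat) : Int) := by omega
        have h2 : end_ = ((end_.toNat : Nat) : Int) := by omega
        rw [h1, h2, PySem.List.slice_natCast]
        congr 1
        omega
      rw [fnsScan_eq_takeWhile cs end_ (end_ - start).toNat start rfl h0]
      simp only [hslice]
      have hlen : (((cs.drop start.toNat).take (end_ - start).toNat).takeWhile (fun c => c == ' ' || c == '\t')).length +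
          (((cs.drop start.toNat).take (end_ - start).toNat).dropWhile (fun c => c == ' ' || c == '\t')).length =
          ((cs.drop start.toNat).take (end_ - start).toNat).length := by
        rw [← List.length_append, List.takeWhile_append_dropWhile]
      omega
    · rw [if_neg hg, if_neg hg]
  rw [hcc]
  exact tail_eq start end_ _ all_spans atomic _
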